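-- pv_equiv track=rewrite | github.com/hanelliotphan/leetcode-solutions | 02293-MinMaxGame.py | minMaxGame
-- ===== SOURCE A (Python) =====
-- from typing import List
--
-- def minMaxGame(nums: List[int]) -> int:
--     """
--     Logic: Recursion
--
--     Time: O(n)
--     Space: O(1) -- replace the same `nums` list
--     """
--     def helper(n):
--         if n == 1:
--             return
--         for i in range(n//2):
--             if i % 2:
--                 nums[i] = max(nums[i*2], nums[i*2+1])
--             else:
--                 nums[i] = min(nums[i*2], nums[i*2+1])
--         helper(n//2)
--         return
--
--     helper(len(nums))
--     return nums[0]
-- ===== SOURCE B (Python) =====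
-- def minMaxGame(nums):
--     # Functional pairwise reduction: build a fresh half-size list each round
--     # (does NOT mutate the caller's list, unlike A; return value identical).
--     cur = list(nums)
--     while len(cur) > 1:
--         cur = [(max if i % 2 else min)(cur[2 * i], cur[2 * i + 1])
--                for i in range(len(cur) // 2)]
--     return cur[0]
-- ===== Notes on version B (the rewrite author's own statement) =====
-- stated objective: simpler
-- what changed: Replaces A's recursive helper that overwrites a prefix of the caller's list in place with an iterative loop building a fresh half-size list per round via a comprehension (no mutation of the argument).
import Mathlib
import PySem

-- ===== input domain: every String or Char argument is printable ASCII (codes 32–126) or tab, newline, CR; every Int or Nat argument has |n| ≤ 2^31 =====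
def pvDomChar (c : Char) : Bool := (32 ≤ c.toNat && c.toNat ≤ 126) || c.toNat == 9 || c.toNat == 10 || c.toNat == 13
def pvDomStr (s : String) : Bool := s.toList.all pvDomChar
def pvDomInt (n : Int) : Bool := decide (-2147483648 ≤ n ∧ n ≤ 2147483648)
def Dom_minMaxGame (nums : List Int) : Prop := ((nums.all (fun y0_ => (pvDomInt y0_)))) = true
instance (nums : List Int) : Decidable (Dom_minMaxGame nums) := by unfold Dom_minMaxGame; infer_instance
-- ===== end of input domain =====

-- B replaces A's in-place prefix-overwriting recursion by an iterative loop building a fresh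
-- half-size list per round (objective: simpler). NOTE: A mutates its argument list in place,
-- B does not; the equivalence proved here is about the RETURN value only.

-- ===== PORT A =====
-- the for-loop of helper(n): writes nums[i] for i in range(k); all indices read/written are
-- in range on every input reached under Pre_, so nums[j] is ported as List.getD j 0 (exact there)
def writeA (nums : List Int) (k : Nat) : List Int :=
  (List.range k).foldl
    (fun acc i =>
      if i % 2 = 1 then acc.set i (max (acc.getD (i * 2) 0) (acc.getD (i * 2 + 1) 0))
      else acc.set i (min (acc.getD (i * 2) 0) (acc.getD (i * 2 + 1) 0)))
    nums

-- helper(n): at n = 0 the Python recurses forever (RecursionError) — that input (the empty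
-- list) is excluded by Pre_minMaxGame, so the n = 0 branch just returns the state
def helperA : List Int → Nat → List Int
  | nums, 0 => nums
  | nums, 1 => nums
  | nums, n + 2 => helperA (writeA nums ((n + 2) / 2)) ((n + 2) / 2)
termination_by _ n => n
decreasing_by omega

def minMaxGame (nums : List Int) : Int :=
  (helperA nums nums.length).getD 0 0

-- ===== PORT B =====
-- one round: the list comprehension over range(len(cur)//2)
def stepB (cur : List Int) : List Int :=
  (List.range (cur.length / 2)).map
    (fun i => if i % 2 = 1 then max (cur.getD (2 * i) 0) (cur.getD (2 * i + 1) 0)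
              else min (cur.getD (2 * i) 0) (cur.getD (2 * i + 1) 0))

theorem stepB_length (cur : List Int) : (stepB cur).length = cur.length / 2 := by
  simp [stepB]

-- the while loop
def loopB (cur : List Int) : List Int :=
  if 1 < cur.length then loopB (stepB cur) else cur
termination_by cur.length
decreasing_by simp only [stepB_length]; omega

def minMaxGame_alt (nums : List Int) : Int :=
  (loopB nums).getD 0 0

-- ===== PRECONDITION & SPEC =====
-- Pre_ excludes only the empty list, on which A raises RecursionError (and B IndexError)
def Pre_minMaxGame (nums : List Int) : Prop := nums ≠ []
instance (nums : List Int) : Decidable (Pre_minMaxGame nums) := by unfold Pre_minMaxGame; infer_instance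
def pvWitness_minMaxGame : List Int := [1, 3, 5, 2]

def Spec_minMaxGame (nums : List Int) (out : Int) : Prop := out = minMaxGame_alt nums
instance (nums : List Int) (out : Int) : Decidable (Spec_minMaxGame nums out) := by unfold Spec_minMaxGame; infer_instance

-- ===== CLAIM (what is proved, stated in full; the proofs are below) =====
def Claim_equal_minMaxGame : Prop := ∀ (nums : List Int), Dom_minMaxGame nums → Pre_minMaxGame nums → Spec_minMaxGame nums (minMaxGame nums)

-- ===== LEMMAS AND PROOFS =====

-- the per-round value at slot i, reading from the ORIGINAL list xs
def slot (xs : List Int) (i : Nat) : Int :=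
  if i % 2 = 1 then max (xs.getD (2 * i) 0) (xs.getD (2 * i + 1) 0)
  else min (xs.getD (2 * i) 0) (xs.getD (2 * i + 1) 0)

theorem stepB_eq_map (xs : List Int) :
    stepB xs = (List.range (xs.length / 2)).map (slot xs) := by
  simp [stepB, slot]

-- A's destructive loop = the fresh prefix ++ the untouched tail (all reads see original values)
theorem writeA_eq (xs : List Int) (k : Nat) (hk : 2 * k ≤ xs.length) :
    writeA xs k = (List.range k).map (slot xs) ++ xs.drop k := by
  induction k with
  | zero => simp [writeA]
  | succ k ih =>
    have hk' : 2 * k ≤ xs.length := by omega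
    have ihk := ih hk'
    have hrange : List.range (k + 1) = List.range k ++ [k] := List.range_succ
    have hfold : writeA xs (k + 1) =
        (fun acc i =>
          if i % 2 = 1 then acc.set i (max (acc.getD (i * 2) 0) (acc.getD (i * 2 + 1) 0))
          else acc.set i (min (acc.getD (i * 2) 0) (acc.getD (i * 2 + 1) 0))) (writeA xs k) k := by
      simp [writeA, hrange]
    have hlenpre : ((List.range k).map (slot xs)).length = k := by simp
    -- reads at 2k, 2k+1 fall in the untouched tail and equal the original values
    have hget : ∀ j : Nat, k ≤ j → j < xs.length →
        (writeA xs k).getD j 0 = xs.getD j 0 := by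
      intro j hj hjlt
      rw [ihk]
      rw [List.getD_append_right _ _ _ _ (by simpa using hj), hlenpre,
          List.getD_eq_getElem?_getD, List.getD_eq_getElem?_getD, List.getElem?_drop]
      have hjk : k + (j - k) = j := by omega
      rw [hjk]
    have hg1 : (writeA xs k).getD (k * 2) 0 = xs.getD (2 * k) 0 := by
      rw [hget (k * 2) (by omega) (by omega)]; ring_nf
    have hg2 : (writeA xs k).getD (k * 2 + 1) 0 = xs.getD (2 * k + 1) 0 := by
      rw [hget (k * 2 + 1) (by omega) (by omega)]; ring_nf
    -- setting slot k appends the new value to the prefix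
    have hset : ∀ v : Int, (writeA xs k).set k v =
        (List.range k).map (slot xs) ++ v :: xs.drop (k + 1) := by
      intro v
      rw [ihk, List.set_append]
      simp only [hlenpre, lt_irrefl, Nat.sub_self]
      rw [List.drop_eq_getElem_cons (by omega : k < xs.length)]
      simp [List.set]
    rw [hfold]
    by_cases hpar : k % 2 = 1
    · simp only [hpar, hg1, hg2, hset]
      rw [hrange, List.map_append]
      simp [slot, hpar]
    · simp only [hpar, hg1, hg2, hset]
      rw [hrange, List.map_append]
      simp [slot, hpar]
  
-- slot only depends on the first 2*(k) entries, so an appended tail is inert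
theorem slot_append (ys zs : List Int) (i : Nat) (h : 2 * i + 1 < ys.length) :
    slot (ys ++ zs) i = slot ys i := by
  unfold slot
  rw [List.getD_append _ _ _ _ (by omega), List.getD_append _ _ _ _ (by omega)]

-- main invariant: A's recursion on ys ++ zs returns, at slot 0, the head of B's loop on ys
theorem helperA_loopB : ∀ n (ys zs : List Int), ys.length = n → 1 ≤ n →
    (helperA (ys ++ zs) n).getD 0 0 = (loopB ys).getD 0 0 := by
  intro n
  induction n using Nat.strong_induction_on with
  | _ n ih =>
    intro ys zs hlen hpos
    match n, hpos with
    | 1, _ =>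
      rw [loopB]
      rw [if_neg (by omega)]
      rw [helperA]
      match ys, hlen with
      | [y], _ => simp
    | (m + 2), _ =>
      rw [helperA]
      have hlen2 : (ys ++ zs).length = m + 2 + zs.length := by rw [List.length_append, hlen]
      have hk : 2 * ((m + 2) / 2) ≤ (ys ++ zs).length := by rw [hlen2]; omega
      rw [writeA_eq _ _ hk]
      have hdrop : (ys ++ zs).drop ((m + 2) / 2) = ys.drop ((m + 2) / 2) ++ zs := by
        rw [List.drop_append_of_le_length (by omega)]
      have hmap : (List.range ((m + 2) / 2)).map (slot (ys ++ zs)) = stepB ys := by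
        rw [stepB_eq_map, hlen]
        refine (List.map_congr_left fun i hi => ?_).symm
        rw [List.mem_range] at hi
        exact (slot_append ys zs i (by omega)).symm
      rw [hdrop, hmap, ← List.append_assoc, List.append_assoc]
      have hIH := ih ((m + 2) / 2) (by omega) (stepB ys) (ys.drop ((m + 2) / 2) ++ zs)
        (by rw [stepB_length, hlen]) (by omega)
      rw [hIH]
      have hstep : loopB ys = loopB (stepB ys) := by
        rw [loopB, if_pos (by omega)]
      rw [hstep]
  
-- ===== VERDICT (by name: the statement is the Claim_ definition above) =====
theorem minMaxGame_spec : Claim_equal_minMaxGame := by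
  intro nums _ hpre
  unfold Spec_minMaxGame minMaxGame minMaxGame_alt
  have := helperA_loopB nums.length nums [] rfl
    (by cases nums with | nil => exact absurd rfl hpre | cons a l => simp)
  simpa using this
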